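-- pv_equiv track=rewrite | github.com/soundwavsg-netizen/dmea-group-4 | backend/services/persona_generation_service.py | generate_buying_trigger
-- ===== SOURCE A (Python) =====
-- from typing import List, Dict, Any
--
-- def generate_buying_trigger(motivation_wts: Dict[str, Any], intent_category: str) -> str:
--     """Generate buying trigger description based on motivations and intent"""
--     dominant_motivations = [name for name, data in motivation_wts.items() if data['category'] == 'dominant']
--     strong_motivations = [name for name, data in motivation_wts.items() if data['category'] == 'strong']
--
--     if intent_category == "dominant":
--         if dominant_motivations:
--             return f"Highly motivated by {', '.join(dominant_motivations[:2])}. Makes purchase decisions quickly when these needs are addressed."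
--         else:
--             return "Strong purchase intent. Actively seeking solutions and ready to buy when the right product is presented."
--     elif intent_category == "strong":
--         if strong_motivations:
--             return f"Influenced by {', '.join(strong_motivations[:2])}. Considers purchases carefully but converts when convinced of value."
--         else:
--             return "Moderate purchase intent. Needs some convincing and validation before making a purchase decision."
--     else:
--         return "Low purchase intent. Requires significant nurturing, education, and trust-building before converting."
-- ===== SOURCE B (Python) =====
-- from typing import List, Dict, Any
--
-- def generate_buying_trigger(motivation_wts: Dict[str, Any], intent_category: str) -> str:
--     """Generate buying trigger description based on motivations and intent"""
--     if intent_category == "dominant":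
--         target = "dominant"
--         prefix = "Highly motivated by "
--         suffix = ". Makes purchase decisions quickly when these needs are addressed."
--         fallback = "Strong purchase intent. Actively seeking solutions and ready to buy when the right product is presented."
--     elif intent_category == "strong":
--         target = "strong"
--         prefix = "Influenced by "
--         suffix = ". Considers purchases carefully but converts when convinced of value."
--         fallback = "Moderate purchase intent. Needs some convincing and validation before making a purchase decision."
--     else:
--         return "Low purchase intent. Requires significant nurturing, education, and trust-building before converting."
--
--     # early-terminating scan: keep only the first two matching names, stop as soon as both are found
--     first = None
--     second = None
--     for name, data in motivation_wts.items():
--         if data['category'] == target: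
--             if first is None:
--                 first = name
--             else:
--                 second = name
--                 break
--
--     if first is None:
--         return fallback
--     if second is None:
--         return prefix + first + suffix
--     return prefix + first + ", " + second + suffix
-- ===== Notes on version B (the rewrite author's own statement) =====
-- stated objective: alternative
-- what changed: B decides the intent branch first and then runs one early-terminating scan that keeps only the first two names of the single relevant category in two slots, assembling the message directly, instead of A's eager construction of both full category lists followed by slicing and join; on the 'else' intent B performs no scan at all.
import Mathlib
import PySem

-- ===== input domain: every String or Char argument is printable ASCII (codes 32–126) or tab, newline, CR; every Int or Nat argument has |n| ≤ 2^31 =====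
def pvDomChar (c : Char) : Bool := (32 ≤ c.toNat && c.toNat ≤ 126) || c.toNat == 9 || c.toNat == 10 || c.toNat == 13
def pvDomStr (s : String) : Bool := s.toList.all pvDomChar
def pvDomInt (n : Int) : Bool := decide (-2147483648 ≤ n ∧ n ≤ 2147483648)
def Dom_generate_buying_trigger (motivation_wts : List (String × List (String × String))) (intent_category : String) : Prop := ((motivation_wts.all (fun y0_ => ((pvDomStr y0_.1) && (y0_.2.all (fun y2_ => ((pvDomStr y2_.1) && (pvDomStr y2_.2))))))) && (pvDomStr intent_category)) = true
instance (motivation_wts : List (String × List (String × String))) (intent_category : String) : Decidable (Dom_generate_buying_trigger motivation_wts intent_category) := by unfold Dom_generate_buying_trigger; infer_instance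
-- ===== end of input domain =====

-- B picks the intent branch first and then gathers only the first two names of the one relevant category in an early-terminating scan (no full lists, no slicing, no join); return values agree on Pre_.

-- ===== PORT A =====
-- data['category'] (inner dict, first-match lookup); Pre_ guarantees the key is present, so the default "" is never used inside Pre_
def pvCat (data : List (String × String)) : String :=
  (PySem.Dict.mk data).getD "category" ""

def generate_buying_trigger (motivation_wts : List (String × List (String × String))) (intent_category : String) : String :=
  let dominant_motivations := (motivation_wts.filter (fun p => pvCat p.2 == "dominant")).map (fun p => p.1)
  let strong_motivations := (motivation_wts.filter (fun p => pvCat p.2 == "strong")).map (fun p => p.1)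
  if intent_category == "dominant" then
    if dominant_motivations ≠ [] then
      "Highly motivated by " ++ PySem.Str.join ", " (PySem.List.slice dominant_motivations none (some 2)) ++ ". Makes purchase decisions quickly when these needs are addressed."
    else
      "Strong purchase intent. Actively seeking solutions and ready to buy when the right product is presented."
  else if intent_category == "strong" then
    if strong_motivations ≠ [] then
      "Influenced by " ++ PySem.Str.join ", " (PySem.List.slice strong_motivations none (some 2)) ++ ". Considers purchases carefully but converts when convinced of value."
    else
      "Moderate purchase intent. Needs some convincing and validation before making a purchase decision."
  else
    "Low purchase intent. Requires significant nurturing, education, and trust-building before converting."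

-- ===== PORT B =====
-- the for-loop with its two slots and `break`: recursion over the entries carrying `first`;
-- finding a second match returns immediately (the break)
def pvScanTwo (target : String) (first : Option String) : List (String × List (String × String)) → Option String × Option String
  | [] => (first, none)
  | p :: rest =>
    if pvCat p.2 == target then
      match first with
      | none => pvScanTwo target (some p.1) rest
      | some f => (some f, some p.1)
    else pvScanTwo target first rest

def generate_buying_trigger_alt (motivation_wts : List (String × List (String × String))) (intent_category : String) : String :=
  if intent_category == "dominant" then
    match pvScanTwo "dominant" none motivation_wts with
    | (none, _) => "Strong purchase intent. Actively seeking solutions and ready to buy when the right product is presented."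
    | (some first, none) => "Highly motivated by " ++ first ++ ". Makes purchase decisions quickly when these needs are addressed."
    | (some first, some second) => "Highly motivated by " ++ first ++ ", " ++ second ++ ". Makes purchase decisions quickly when these needs are addressed."
  else if intent_category == "strong" then
    match pvScanTwo "strong" none motivation_wts with
    | (none, _) => "Moderate purchase intent. Needs some convincing and validation before making a purchase decision."
    | (some first, none) => "Influenced by " ++ first ++ ". Considers purchases carefully but converts when convinced of value."
    | (some first, some second) => "Influenced by " ++ first ++ ", " ++ second ++ ". Considers purchases carefully but converts when convinced of value."
  else
    "Low purchase intent. Requires significant nurturing, education, and trust-building before converting."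

-- ===== PRECONDITION & SPEC =====
-- Pre_ excludes exactly the inputs where some entry's inner dict lacks the key 'category': there Python A raises KeyError.
def Pre_generate_buying_trigger (motivation_wts : List (String × List (String × String))) (intent_category : String) : Prop :=
  motivation_wts.all (fun p => (PySem.Dict.mk p.2).contains "category") = true
instance (motivation_wts : List (String × List (String × String))) (intent_category : String) : Decidable (Pre_generate_buying_trigger motivation_wts intent_category) := by unfold Pre_generate_buying_trigger; infer_instance
def pvWitness_generate_buying_trigger : (List (String × List (String × String))) × String :=
  ([("speed", [("category", "dominant")]), ("trust", [("category", "strong")])], "dominant")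
def Spec_generate_buying_trigger (motivation_wts : List (String × List (String × String))) (intent_category : String) (out : String) : Prop := out = generate_buying_trigger_alt motivation_wts intent_category
instance (motivation_wts : List (String × List (String × String))) (intent_category : String) (out : String) : Decidable (Spec_generate_buying_trigger motivation_wts intent_category out) := by unfold Spec_generate_buying_trigger; infer_instance

-- ===== CLAIM (what is proved, stated in full; the proofs are below) =====
def Claim_equal_generate_buying_trigger : Prop := ∀ (motivation_wts : List (String × List (String × String))) (intent_category : String), Dom_generate_buying_trigger motivation_wts intent_category → Pre_generate_buying_trigger motivation_wts intent_category → Spec_generate_buying_trigger motivation_wts intent_category (generate_buying_trigger motivation_wts intent_category)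

-- ===== LEMMAS AND PROOFS =====

-- once a first match is held, the scan returns it with the head of the remaining filtered names
theorem pvScanTwo_some (target f : String) (mw : List (String × List (String × String))) :
    pvScanTwo target (some f) mw
      = (some f, ((mw.filter (fun p => pvCat p.2 == target)).map (fun p => p.1)).head?) := by
  induction mw with
  | nil => simp [pvScanTwo]
  | cons p rest ih =>
    by_cases h : (pvCat p.2 == target) = true
    · simp [pvScanTwo, h, List.filter_cons_of_pos]
    · simp [pvScanTwo, h, ih]

-- the scan from the empty state computes the first two filtered names
theorem pvScanTwo_none (target : String) (mw : List (String × List (String × String))) :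
    pvScanTwo target none mw
      = (match (mw.filter (fun p => pvCat p.2 == target)).map (fun p => p.1) with
         | [] => (none, none)
         | a :: rest => (some a, rest.head?)) := by
  induction mw with
  | nil => simp [pvScanTwo]
  | cons p rest ih =>
    by_cases h : (pvCat p.2 == target) = true
    · simp [pvScanTwo, h, List.filter_cons_of_pos, pvScanTwo_some]
    · simp [pvScanTwo, h, ih]

theorem join_one (a : String) : PySem.Str.join ", " [a] = a := by
  have h : (PySem.Str.join ", " [a]).toList = a.toList := by
    simp [PySem.Str.join, PySem.Chars.join_singleton]
  exact String.toList_inj.mp h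

theorem join_two (a b : String) : PySem.Str.join ", " [a, b] = a ++ ", " ++ b := by
  have h : (PySem.Str.join ", " [a, b]).toList = (a ++ ", " ++ b).toList := by
    simp [PySem.Str.join, PySem.Chars.join_cons_cons, PySem.Chars.join_singleton]
  exact String.toList_inj.mp h

-- A's nonempty-check + slice[:2] + join over a name list equals B's case split on its first two elements
theorem fmt_eq (pre suf fb : String) (l : List String) :
    (if l ≠ [] then pre ++ PySem.Str.join ", " (PySem.List.slice l none (some 2)) ++ suf else fb)
    = (match (match l with
              | [] => ((none : Option String), (none : Option String))
              | a :: rest => (some a, rest.head?)) with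
       | (none, _) => fb
       | (some first, none) => pre ++ first ++ suf
       | (some first, some second) => pre ++ first ++ ", " ++ second ++ suf) := by
  match l with
  | [] => simp
  | [a] => simp [PySem.List.slice_to [a] (b := (2 : Int)) (by norm_num), join_one]
  | a :: b :: t =>
    simp [PySem.List.slice_to (a :: b :: t) (b := (2 : Int)) (by norm_num), join_two,
      String.append_assoc]

-- ===== VERDICT (by name: the statement is the Claim_ definition above) =====
theorem generate_buying_trigger_spec : Claim_equal_generate_buying_trigger := by
  intro mw ic _ _
  unfold Spec_generate_buying_trigger generate_buying_trigger generate_buying_trigger_alt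
  rw [pvScanTwo_none, pvScanTwo_none]
  by_cases h1 : (ic == "dominant") = true
  · simpa [h1] using fmt_eq "Highly motivated by "
      ". Makes purchase decisions quickly when these needs are addressed."
      "Strong purchase intent. Actively seeking solutions and ready to buy when the right product is presented."
      ((mw.filter (fun p => pvCat p.2 == "dominant")).map (fun p => p.1))
  · by_cases h2 : (ic == "strong") = true
    · simpa [h1, h2] using fmt_eq "Influenced by "
        ". Considers purchases carefully but converts when convinced of value."
        "Moderate purchase intent. Needs some convincing and validation before making a purchase decision."
        ((mw.filter (fun p => pvCat p.2 == "strong")).map (fun p => p.1))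
    · simp [h1, h2]
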